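-- pv_equiv track=rewrite | github.com/paudley/py_qa | src/pyqa/linting/generic_value_types.py | _traits_from_bases
-- ===== SOURCE A (Python) =====
-- from typing import Final, cast
--
-- _TRAIT_ENUM: Final[str] = "enum"
--
-- _TRAIT_ITERABLE: Final[str] = "iterable"
--
-- _TRAIT_SEQUENCE: Final[str] = "sequence"
--
-- _TRAIT_MAPPING: Final[str] = "mapping"
--
-- _TRAIT_VALUE_SEMANTICS: Final[str] = "value"
--
-- _ENUM_SUFFIX: Final[str] = "Enum"
--
-- _NAMEDTUPLE_SUFFIXES: Final[tuple[str, ...]] = ("NamedTuple", "tuple")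
--
-- _ITERABLE_BASES: Final[tuple[str, ...]] = ("Iterable", "Collection")
--
-- _SEQUENCE_BASES: Final[tuple[str, ...]] = ("Sequence", "MutableSequence")
--
-- _MAPPING_BASES: Final[tuple[str, ...]] = ("Mapping", "MutableMapping")
--
-- def _traits_from_bases(bases: tuple[str, ...]) -> set[str]:
--     """Return traits implied by base classes listed in ``bases``.
--
--     Args:
--         bases: Base class names extracted from the class definition.
--
--     Returns:
--         set[str]: Trait identifiers derived from base classes.
--     """
--
--     traits: set[str] = set()
--     if any(base.endswith(_ENUM_SUFFIX) for base in bases):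
--         traits.add(_TRAIT_ENUM)
--     if any(base.endswith(suffix) for base in bases for suffix in _NAMEDTUPLE_SUFFIXES):
--         traits.add(_TRAIT_VALUE_SEMANTICS)
--     if any(base.endswith(option) for base in bases for option in _ITERABLE_BASES):
--         traits.add(_TRAIT_ITERABLE)
--     if any(base.endswith(option) for base in bases for option in _SEQUENCE_BASES):
--         traits.add(_TRAIT_SEQUENCE)
--     if any(base.endswith(option) for base in bases for option in _MAPPING_BASES):
--         traits.add(_TRAIT_MAPPING)
--     return traits
-- ===== SOURCE B (Python) =====
-- # Per-base classifier: dispatch on the LAST character of each base name, then test only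
-- # the suffixes that can still match; "MutableSequence"/"MutableMapping" are subsumed by
-- # the "Sequence"/"Mapping" suffix checks, so they never need their own test.
-- _TRAIT_ORDER = ("enum", "value", "iterable", "sequence", "mapping")
--
--
-- def _classify(base):
--     """Traits implied by a single base name (last-character dispatch)."""
--     if not base:
--         return ()
--     last = base[-1]
--     if last == "m":
--         return ("enum",) if base.endswith("Enum") else ()
--     if last == "e":
--         traits = []
--         if base.endswith("NamedTuple") or base.endswith("tuple"):
--             traits.append("value")
--         if base.endswith("Iterable"):
--             traits.append("iterable")
--         if base.endswith("Sequence"):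
--             traits.append("sequence")
--         return tuple(traits)
--     if last == "n":
--         return ("iterable",) if base.endswith("Collection") else ()
--     if last == "g":
--         return ("mapping",) if base.endswith("Mapping") else ()
--     return ()
--
--
-- def _traits_from_bases(bases):
--     found = set()
--     for base in bases:
--         found.update(_classify(base))
--     return {t for t in _TRAIT_ORDER if t in found}
-- ===== Notes on version B (the rewrite author's own statement) =====
-- stated objective: faster
-- what changed: Replaces A's five whole-list any()-passes with a single pass that classifies each base by dispatching on its last character and testing only the suffixes that can still match (dropping 'MutableSequence'/'MutableMapping' as subsumed by the 'Sequence'/'Mapping' checks), then unions the per-base trait sets.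
import Mathlib
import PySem

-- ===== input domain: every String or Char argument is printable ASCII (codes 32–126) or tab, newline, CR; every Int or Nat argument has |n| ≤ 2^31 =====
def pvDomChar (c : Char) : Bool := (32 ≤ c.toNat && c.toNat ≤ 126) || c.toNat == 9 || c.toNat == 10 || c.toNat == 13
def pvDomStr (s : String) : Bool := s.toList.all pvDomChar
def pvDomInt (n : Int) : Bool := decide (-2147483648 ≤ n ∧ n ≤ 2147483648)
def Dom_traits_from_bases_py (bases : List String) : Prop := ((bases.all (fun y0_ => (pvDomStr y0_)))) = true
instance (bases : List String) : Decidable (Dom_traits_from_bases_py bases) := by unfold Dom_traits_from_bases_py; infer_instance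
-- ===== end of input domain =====

-- B replaces A's five whole-list any() passes with a per-base classifier that dispatches on the last character and drops the suffixes subsumed by "Sequence"/"Mapping"; equal sets, same canonical order.


-- ===== PORT A =====
-- literal port of _traits_from_bases: five any() passes, one conditional set.add per trait
def traits_from_bases_py (bases : List String) : List String :=
  let traits : PySem.Set String := PySem.Set.empty
  let traits := if bases.any (fun base => PySem.Str.endswith base "Enum")
    then PySem.Set.add traits "enum" else traits
  let traits := if bases.any (fun base => (["NamedTuple", "tuple"] : List String).any
      (fun suffix => PySem.Str.endswith base suffix))
    then PySem.Set.add traits "value" else traits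
  let traits := if bases.any (fun base => (["Iterable", "Collection"] : List String).any
      (fun option => PySem.Str.endswith base option))
    then PySem.Set.add traits "iterable" else traits
  let traits := if bases.any (fun base => (["Sequence", "MutableSequence"] : List String).any
      (fun option => PySem.Str.endswith base option))
    then PySem.Set.add traits "sequence" else traits
  let traits := if bases.any (fun base => (["Mapping", "MutableMapping"] : List String).any
      (fun option => PySem.Str.endswith base option))
    then PySem.Set.add traits "mapping" else traits
  traits

-- ===== PORT B =====
-- literal port of Source B's _classify: last-character dispatch, minimal suffix checks
def pvClassify (base : String) : List String :=
  if base = "" then []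
  else match PySem.Str.pyGet? base (-1) with
    | none => []   -- unreachable: base is nonempty, so base[-1] exists
    | some last =>
      if last = 'm' then (if PySem.Str.endswith base "Enum" then ["enum"] else [])
      else if last = 'e' then
        (if PySem.Str.endswith base "NamedTuple" || PySem.Str.endswith base "tuple"
          then ["value"] else []) ++
        (if PySem.Str.endswith base "Iterable" then ["iterable"] else []) ++
        (if PySem.Str.endswith base "Sequence" then ["sequence"] else [])
      else if last = 'n' then (if PySem.Str.endswith base "Collection" then ["iterable"] else [])
      else if last = 'g' then (if PySem.Str.endswith base "Mapping" then ["mapping"] else [])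
      else []

def pvTraitOrder : List String := ["enum", "value", "iterable", "sequence", "mapping"]

-- literal port of Source B's _traits_from_bases: union of per-base classifications, then canonical order
def traits_from_bases_py_alt (bases : List String) : List String :=
  let found : PySem.Set String :=
    bases.foldl (fun acc base => PySem.Set.update acc (pvClassify base)) PySem.Set.empty
  pvTraitOrder.foldl
    (fun out trait => if PySem.Set.contains found trait then PySem.Set.add out trait else out)
    PySem.Set.empty

-- ===== PRECONDITION & SPEC =====
def Spec_traits_from_bases_py (bases : List String) (out : List String) : Prop := out = traits_from_bases_py_alt bases
instance (bases : List String) (out : List String) : Decidable (Spec_traits_from_bases_py bases out) := by unfold Spec_traits_from_bases_py; infer_instance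

-- ===== CLAIM (what is proved, stated in full; the proofs are below) =====
def Claim_equal_traits_from_bases_py : Prop := ∀ (bases : List String), Dom_traits_from_bases_py bases → Spec_traits_from_bases_py bases (traits_from_bases_py bases)

-- ===== LEMMAS AND PROOFS =====

-- the shared shape of both outputs: conditionally add the five traits in canonical order
def pvChain (e v i s m : Bool) : List String :=
  let t : PySem.Set String := PySem.Set.empty
  let t := if e then PySem.Set.add t "enum" else t
  let t := if v then PySem.Set.add t "value" else t
  let t := if i then PySem.Set.add t "iterable" else t
  let t := if s then PySem.Set.add t "sequence" else t
  let t := if m then PySem.Set.add t "mapping" else t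
  t

def pvFound (bases : List String) : PySem.Set String :=
  bases.foldl (fun acc base => PySem.Set.update acc (pvClassify base)) PySem.Set.empty

-- endswith implies the last characters agree
lemma last_of_ends (b p : String) (c : Char) (hc : p.toList.getLast? = some c)
    (h : PySem.Str.endswith b p = true) : b.toList.getLast? = some c := by
  rw [PySem.Str.endswith_eq, PySem.Chars.endswith_iff] at h
  obtain ⟨t, ht⟩ := h
  rw [← ht, List.getLast?_append_of_ne_nil t (by intro h0; rw [h0] at hc; simp at hc), hc]

-- suffix subsumption: endswith "MutableSequence"/"MutableMapping" implies endswith "Sequence"/"Mapping"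
lemma ends_trans (b p q : String) (hpq : q.toList <:+ p.toList)
    (h : PySem.Str.endswith b p = true) : PySem.Str.endswith b q = true := by
  rw [PySem.Str.endswith_eq, PySem.Chars.endswith_iff] at h ⊢
  exact List.IsSuffix.trans hpq h

lemma mem_update_fold (bases : List String) (acc : PySem.Set String) (t : String) :
    t ∈ bases.foldl (fun acc base => PySem.Set.update acc (pvClassify base)) acc
      ↔ t ∈ acc ∨ ∃ b ∈ bases, t ∈ pvClassify b := by
  induction bases generalizing acc with
  | nil => simp
  | cons hd tl ih =>
    rw [List.foldl_cons, ih]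
    have hupd : ∀ (xs : List String) (s : PySem.Set String),
        t ∈ PySem.Set.update s xs ↔ t ∈ s ∨ t ∈ xs := by
      intro xs
      induction xs with
      | nil => simp [PySem.Set.update]
      | cons x xt ihx =>
        intro s
        simp only [PySem.Set.update, List.foldl_cons] at *
        rw [ihx (PySem.Set.add s x)]
        simp [PySem.Set.mem_add, or_assoc]
    rw [hupd]
    simp only [List.mem_cons, exists_eq_or_imp]
    tauto

lemma mem_found (bases : List String) (t : String) :
    t ∈ pvFound bases ↔ ∃ b ∈ bases, t ∈ pvClassify b := by
  rw [pvFound, mem_update_fold]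
  simp [PySem.Set.empty]

-- the five per-base classification lemmas: pvClassify yields a trait iff A's suffix test fires
lemma ends_false_of_last (b p : String) (c c' : Char) (hc : b.toList.getLast? = some c)
    (hp : p.toList.getLast? = some c') (hne : c ≠ c') : PySem.Str.endswith b p = false := by
  by_contra h
  rw [Bool.not_eq_false] at h
  have h2 := last_of_ends b p c' hp h
  rw [hc] at h2
  exact hne (Option.some.inj h2)

lemma toList_ne_nil (b : String) (hb : b ≠ "") : b.toList ≠ [] := by
  intro h; exact hb (by cases b; simp_all)

lemma pyGet_neg_one_str (b : String) (c : Char) (hc : b.toList.getLast? = some c) :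
    PySem.Str.pyGet? b (-1) = some c := by
  simp [PySem.List.pyGet?_neg_one, hc]

lemma classify_enum (b : String) :
    ("enum" ∈ pvClassify b) ↔ (PySem.Str.endswith b "Enum") = true := by
  unfold pvClassify
  by_cases hb : b = ""
  · subst hb; simp; decide
  · rw [if_neg hb]
    obtain ⟨c, hc⟩ := Option.isSome_iff_exists.mp
      (List.getLast?_isSome.mpr (toList_ne_nil b hb))
    rw [pyGet_neg_one_str b c hc]
    dsimp only
    by_cases hm : c = 'm'
    · subst hm; rw [if_pos rfl]; split_ifs with he <;> simp_all
    · rw [if_neg hm, ends_false_of_last b "Enum" c 'm' hc (by decide) hm]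
      split_ifs <;> simp

lemma classify_value (b : String) :
    ("value" ∈ pvClassify b) ↔
      ((["NamedTuple", "tuple"] : List String).any
        (fun suffix => PySem.Str.endswith b suffix)) = true := by
  simp only [List.any_cons, List.any_nil, Bool.or_false]
  unfold pvClassify
  by_cases hb : b = ""
  · subst hb; simp; decide
  · rw [if_neg hb]
    obtain ⟨c, hc⟩ := Option.isSome_iff_exists.mp
      (List.getLast?_isSome.mpr (toList_ne_nil b hb))
    rw [pyGet_neg_one_str b c hc]
    dsimp only
    by_cases he : c = 'e'
    · subst he
      rw [if_neg (by decide), if_pos rfl]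
      split_ifs <;> simp_all
    · rw [ends_false_of_last b "NamedTuple" c 'e' hc (by decide) he,
        ends_false_of_last b "tuple" c 'e' hc (by decide) he]
      split_ifs <;> simp

lemma classify_iterable (b : String) :
    ("iterable" ∈ pvClassify b) ↔
      ((["Iterable", "Collection"] : List String).any
        (fun option => PySem.Str.endswith b option)) = true := by
  simp only [List.any_cons, List.any_nil, Bool.or_false]
  unfold pvClassify
  by_cases hb : b = ""
  · subst hb; simp; decide
  · rw [if_neg hb]
    obtain ⟨c, hc⟩ := Option.isSome_iff_exists.mp
      (List.getLast?_isSome.mpr (toList_ne_nil b hb))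
    rw [pyGet_neg_one_str b c hc]
    dsimp only
    by_cases he : c = 'e'
    · subst he
      rw [if_neg (by decide), if_pos rfl,
        ends_false_of_last b "Collection" 'e' 'n' hc (by decide) (by decide)]
      split_ifs <;> simp_all
    · rw [ends_false_of_last b "Iterable" c 'e' hc (by decide) he]
      by_cases hn : c = 'n'
      · subst hn
        rw [if_neg (by decide), if_neg he, if_pos rfl]
        split_ifs <;> simp_all
      · rw [ends_false_of_last b "Collection" c 'n' hc (by decide) hn]
        split_ifs <;> simp

lemma classify_sequence (b : String) :
    ("sequence" ∈ pvClassify b) ↔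
      ((["Sequence", "MutableSequence"] : List String).any
        (fun option => PySem.Str.endswith b option)) = true := by
  simp only [List.any_cons, List.any_nil, Bool.or_false]
  unfold pvClassify
  by_cases hb : b = ""
  · subst hb; simp; decide
  · rw [if_neg hb]
    obtain ⟨c, hc⟩ := Option.isSome_iff_exists.mp
      (List.getLast?_isSome.mpr (toList_ne_nil b hb))
    rw [pyGet_neg_one_str b c hc]
    dsimp only
    by_cases he : c = 'e'
    · subst he
      rw [if_neg (by decide), if_pos rfl]
      have hsub : PySem.Str.endswith b "MutableSequence" = true →
          PySem.Str.endswith b "Sequence" = true :=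
        fun h => ends_trans b "MutableSequence" "Sequence" (by decide) h
      have hiff : (PySem.Str.endswith b "Sequence" || PySem.Str.endswith b "MutableSequence")
          = PySem.Str.endswith b "Sequence" := by
        cases hS : PySem.Str.endswith b "Sequence" <;>
          cases hMu : PySem.Str.endswith b "MutableSequence" <;> simp_all
      rw [hiff]
      split_ifs with h1 h2 h3 <;> simp_all
    · rw [ends_false_of_last b "Sequence" c 'e' hc (by decide) he,
        ends_false_of_last b "MutableSequence" c 'e' hc (by decide) he]
      split_ifs <;> simp

lemma classify_mapping (b : String) :
    ("mapping" ∈ pvClassify b) ↔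
      ((["Mapping", "MutableMapping"] : List String).any
        (fun option => PySem.Str.endswith b option)) = true := by
  simp only [List.any_cons, List.any_nil, Bool.or_false]
  unfold pvClassify
  by_cases hb : b = ""
  · subst hb; simp; decide
  · rw [if_neg hb]
    obtain ⟨c, hc⟩ := Option.isSome_iff_exists.mp
      (List.getLast?_isSome.mpr (toList_ne_nil b hb))
    rw [pyGet_neg_one_str b c hc]
    dsimp only
    by_cases hg : c = 'g'
    · subst hg
      rw [if_neg (by decide), if_neg (by decide), if_neg (by decide), if_pos rfl]
      have hsub : PySem.Str.endswith b "MutableMapping" = true →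
          PySem.Str.endswith b "Mapping" = true :=
        fun h => ends_trans b "MutableMapping" "Mapping" (by decide) h
      have hiff : (PySem.Str.endswith b "Mapping" || PySem.Str.endswith b "MutableMapping")
          = PySem.Str.endswith b "Mapping" := by
        cases hS : PySem.Str.endswith b "Mapping" <;>
          cases hMu : PySem.Str.endswith b "MutableMapping" <;> simp_all
      rw [hiff]
      split_ifs with h1 <;> simp_all
    · rw [ends_false_of_last b "Mapping" c 'g' hc (by decide) hg,
        ends_false_of_last b "MutableMapping" c 'g' hc (by decide) hg]
      split_ifs <;> simp

lemma contains_found (bases : List String) (t : String) (f : String → Bool)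
    (hf : ∀ b, (t ∈ pvClassify b) ↔ f b = true) :
    PySem.Set.contains (pvFound bases) t = bases.any f := by
  have h : (PySem.Set.contains (pvFound bases) t = true) ↔ (bases.any f = true) := by
    rw [PySem.Set.contains_iff, mem_found]
    simp only [List.any_eq_true]
    constructor
    · rintro ⟨b, hb, hc⟩; exact ⟨b, hb, (hf b).mp hc⟩
    · rintro ⟨b, hb, hc⟩; exact ⟨b, hb, (hf b).mpr hc⟩
  exact Bool.coe_iff_coe.mp h

lemma alt_eq_chain (bases : List String) :
    traits_from_bases_py_alt bases =
      pvChain (PySem.Set.contains (pvFound bases) "enum")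
        (PySem.Set.contains (pvFound bases) "value")
        (PySem.Set.contains (pvFound bases) "iterable")
        (PySem.Set.contains (pvFound bases) "sequence")
        (PySem.Set.contains (pvFound bases) "mapping") := rfl

lemma a_eq_chain (bases : List String) :
    traits_from_bases_py bases =
      pvChain (bases.any (fun base => PySem.Str.endswith base "Enum"))
        (bases.any (fun base => (["NamedTuple", "tuple"] : List String).any
          (fun suffix => PySem.Str.endswith base suffix)))
        (bases.any (fun base => (["Iterable", "Collection"] : List String).any
          (fun option => PySem.Str.endswith base option)))
        (bases.any (fun base => (["Sequence", "MutableSequence"] : List String).any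
          (fun option => PySem.Str.endswith base option)))
        (bases.any (fun base => (["Mapping", "MutableMapping"] : List String).any
          (fun option => PySem.Str.endswith base option))) := rfl

-- ===== VERDICT (by name: the statement is the Claim_ definition above) =====
theorem traits_from_bases_py_spec : Claim_equal_traits_from_bases_py := by
  intro bases _
  unfold Spec_traits_from_bases_py
  rw [a_eq_chain, alt_eq_chain,
    contains_found bases "enum" (fun base => PySem.Str.endswith base "Enum")
      classify_enum,
    contains_found bases "value" (fun base => (["NamedTuple", "tuple"] : List String).any
      (fun suffix => PySem.Str.endswith base suffix)) classify_value,
    contains_found bases "iterable" (fun base => (["Iterable", "Collection"] : List String).any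
      (fun option => PySem.Str.endswith base option)) classify_iterable,
    contains_found bases "sequence" (fun base => (["Sequence", "MutableSequence"] : List String).any
      (fun option => PySem.Str.endswith base option)) classify_sequence,
    contains_found bases "mapping" (fun base => (["Mapping", "MutableMapping"] : List String).any
      (fun option => PySem.Str.endswith base option)) classify_mapping]
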